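-- pv_equiv track=rewrite | github.com/p3cap/nokia_hackaton | fibonacci/main.py | fibonacci_div_3
-- ===== SOURCE A (Python) =====
-- def fibonacci_div_3(n:int):
--   #validating
--   if n.isnumeric(): n = int(n)
--   else: return []
--
--   num, upcoming = 0, 1 #first and next possible sulution
--   result = []
--   while num <= n:
--     if num % 3 == 0:
--       result.append(num)
--     num, upcoming = upcoming, num + upcoming #fibonacci sequence: "each number is equal to the sum of the preceding two numbers"
--
--   return result
-- ===== SOURCE B (Python) =====
-- def fibonacci_div_3(n):
--   # validating (kept verbatim in meaning from the original)
--   if not n.isnumeric(): return []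
--   n = int(n)
--
--   # Every 4th Fibonacci number, and only those, is divisible by 3, and the
--   # subsequence F(0), F(4), F(8), ... satisfies next = 7*b - a.  So generate
--   # the multiples of 3 directly from (0, 3) with no modulo test.
--   out = []
--   a, b = 0, 3
--   while a <= n:
--     out.append(a)
--     a, b = b, 7*b - a
--   return out
-- ===== Notes on version B (the rewrite author's own statement) =====
-- stated objective: alternative
-- what changed: Instead of walking every Fibonacci number and testing num % 3 == 0, B generates only the Fibonacci multiples of 3 directly via the second-order jump recurrence a, b = b, 7*b - a starting from (0, 3), accumulating them with no modulo test.
import Mathlib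
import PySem

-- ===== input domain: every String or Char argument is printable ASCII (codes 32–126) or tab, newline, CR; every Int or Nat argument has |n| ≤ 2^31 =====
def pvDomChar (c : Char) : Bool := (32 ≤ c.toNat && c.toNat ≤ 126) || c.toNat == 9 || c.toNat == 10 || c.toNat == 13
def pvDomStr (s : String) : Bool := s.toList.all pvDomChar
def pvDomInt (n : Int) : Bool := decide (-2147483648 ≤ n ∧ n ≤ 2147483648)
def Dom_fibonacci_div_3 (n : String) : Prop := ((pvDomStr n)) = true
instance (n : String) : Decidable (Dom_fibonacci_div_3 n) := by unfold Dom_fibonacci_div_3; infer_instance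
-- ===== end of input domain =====

-- B replaces A's walk over every Fibonacci number with a modulo test by the jump recurrence
-- (a, b) -> (b, 7b - a) from (0, 3), which generates exactly the Fibonacci multiples of 3
-- into an accumulator with no divisibility test (objective: alternative).

-- ===== PORT A =====
-- A's while-loop: (num, up) walks the Fibonacci sequence; append num when num % 3 == 0.
-- The Nat fuel only makes the recursion total; started with fuel (3*n + 2).toNat it provably
-- never runs out before the loop's own exit test num ≤ n fails (that is what fibLoop_eq uses).
def fibLoopA : Nat → Int → Int → Int → List Int
  | 0, _, _, _ => []
  | fuel + 1, n, num, up =>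
    if num ≤ n then (if num % 3 == 0 then [num] else []) ++ fibLoopA fuel n up (num + up)
    else []

-- n.isnumeric() agrees with "nonempty and all digit chars" on the printable-ASCII domain;
-- int(n) = PySem.Int.ofStr? (never none once strIsdigit holds, so the none arm is unreachable).
def fibonacci_div_3 (n : String) : List Int :=
  if PySem.Str.strIsdigit n then
    match PySem.Int.ofStr? n with
    | some m => fibLoopA (3 * m + 2).toNat m 0 1
    | none => []
  else []

-- ===== PORT B =====
-- Source B's while-loop, tail-recursively with the accumulator `out` (cons + final reverse is the
-- transliteration of out.append); the fuel (n + 1).toNat only makes the recursion total.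
def jumpAcc : Nat → Int → Int → Int → List Int → List Int
  | 0, _, _, _, out => out.reverse
  | fuel + 1, n, a, b, out =>
    if a ≤ n then jumpAcc fuel n b (7 * b - a) (a :: out)
    else out.reverse

def fibonacci_div_3_alt (n : String) : List Int :=
  if ¬ PySem.Str.strIsdigit n then []
  else
    match PySem.Int.ofStr? n with
    | none => []
    | some m => jumpAcc (m + 1).toNat m 0 3 []

-- ===== PRECONDITION & SPEC =====
def Spec_fibonacci_div_3 (n : String) (out : List Int) : Prop := out = fibonacci_div_3_alt n
instance (n : String) (out : List Int) : Decidable (Spec_fibonacci_div_3 n out) := by unfold Spec_fibonacci_div_3; infer_instance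

-- ===== CLAIM =====
def Claim_equal_fibonacci_div_3 : Prop := ∀ (n : String), Dom_fibonacci_div_3 n → Spec_fibonacci_div_3 n (fibonacci_div_3 n)

-- ===== LEMMAS AND PROOFS =====

-- Accumulator-free view of B's loop, used only by the proofs.
def jumpPlain : Nat → Int → Int → Int → List Int
  | 0, _, _, _ => []
  | fuel + 1, n, a, b =>
    if a ≤ n then a :: jumpPlain fuel n b (7 * b - a)
    else []

theorem jumpAcc_eq (f : Nat) (n a b : Int) (out : List Int) :
    jumpAcc f n a b out = out.reverse ++ jumpPlain f n a b := by
  induction f generalizing a b out with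
  | zero => simp [jumpAcc, jumpPlain]
  | succ f ih =>
    simp only [jumpAcc, jumpPlain]
    by_cases h : a ≤ n
    · rw [if_pos h, if_pos h, ih]; simp
    · rw [if_neg h, if_neg h]; simp

theorem fibLoopA_nil (f : Nat) (n num up : Int) (h : ¬ num ≤ n) : fibLoopA f n num up = [] := by
  cases f <;> simp [fibLoopA, h]

theorem jumpPlain_nil (f : Nat) (n a b : Int) (h : ¬ a ≤ n) : jumpPlain f n a b = [] := by
  cases f <;> simp [jumpPlain, h]

-- Core invariant: from A's state (a, u) with a ≡ 0 and u ≢ 0 (mod 3) and 0 ≤ a < u ≤ 2a+1,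
-- four steps of A's loop append exactly a (when a ≤ n) and land on (2a+3u, 3a+5u), while one
-- step of B's jump from (a, 2a+3u) emits a and lands on (2a+3u, 13a+21u) = (a', 2a'+3u').
theorem fibLoop_eq (fB fA : Nat) (n a u : Int) (h0 : 0 ≤ a) (hau : a < u) (hu2 : u ≤ 2 * a + 1)
    (ha3 : a % 3 = 0) (hu3 : ¬ u % 3 = 0)
    (hfA : (3 * n + 2 - (a + u)).toNat ≤ fA) (hfB : (n + 1 - a).toNat ≤ fB) :
    fibLoopA fA n a u = jumpPlain fB n a (2 * a + 3 * u) := by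
  induction fB generalizing fA a u with
  | zero =>
    have hn : ¬ a ≤ n := by omega
    rw [fibLoopA_nil _ _ _ _ hn, jumpPlain_nil _ _ _ _ hn]
  | succ f ih =>
    by_cases hn : a ≤ n
    · cases fA with
      | zero => exact absurd hfA (by omega)
      | succ f1 =>
        simp only [fibLoopA, jumpPlain]
        rw [if_pos hn, if_pos hn, if_pos (by simpa using ha3)]
        by_cases h1 : u ≤ n
        · cases f1 with
          | zero => exact absurd hfA (by omega)
          | succ f2 =>
            simp only [fibLoopA]
            rw [if_pos h1, if_neg (by simpa using hu3),
              show u + (a + u) = a + 2 * u from by ring]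
            by_cases h2 : a + u ≤ n
            · cases f2 with
              | zero => exact absurd hfA (by omega)
              | succ f3 =>
                simp only [fibLoopA]
                rw [if_pos h2, if_neg (by simp; omega),
                  show (a + u) + (a + 2 * u) = 2 * a + 3 * u from by ring]
                by_cases h3 : a + 2 * u ≤ n
                · cases f3 with
                  | zero => exact absurd hfA (by omega)
                  | succ f4 =>
                    simp only [fibLoopA]
                    rw [if_pos h3, if_neg (by simp; omega),
                      show (a + 2 * u) + (2 * a + 3 * u) = 3 * a + 5 * u from by ring]
                    simp only [List.nil_append, List.singleton_append, List.cons.injEq, true_and]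
                    rw [show 7 * (2 * a + 3 * u) - a = 2 * (2 * a + 3 * u) + 3 * (3 * a + 5 * u) from by ring]
                    exact ih f4 (2 * a + 3 * u) (3 * a + 5 * u)
                      (by omega) (by omega) (by omega) (by omega) (by omega)
                      (by omega) (by omega)
                · rw [fibLoopA_nil _ _ _ _ h3, jumpPlain_nil _ _ _ _ (by omega)]
                  simp
            · rw [fibLoopA_nil _ _ _ _ h2, jumpPlain_nil _ _ _ _ (by omega)]
              simp
        · rw [fibLoopA_nil _ _ _ _ h1, jumpPlain_nil _ _ _ _ (by omega)]
          simp
    · rw [fibLoopA_nil _ _ _ _ hn, jumpPlain_nil _ _ _ _ hn]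

-- ===== VERDICT =====
theorem fibonacci_div_3_spec : Claim_equal_fibonacci_div_3 := by
  intro n _
  unfold Spec_fibonacci_div_3 fibonacci_div_3 fibonacci_div_3_alt
  by_cases hd : PySem.Str.strIsdigit n
  · rw [if_pos hd, if_neg (by simpa using hd)]
    cases PySem.Int.ofStr? n with
    | none => rfl
    | some m =>
      show fibLoopA (3 * m + 2).toNat m 0 1 = jumpAcc (m + 1).toNat m 0 3 []
      rw [jumpAcc_eq]
      simpa using fibLoop_eq (m + 1).toNat ((3 * m + 2).toNat) m 0 1
        (by omega) (by omega) (by omega) (by omega) (by omega) (by omega) (by omega)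
  · rw [if_neg hd, if_pos (by simpa using hd)]
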